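-- pv_equiv track=rewrite | github.com/BenoitMorel/phd_experiments | tools/publications_generax/plot_new_results.py | merge_datasets_per_seed
-- ===== SOURCE A (Python) =====
-- def merge_datasets_per_seed(datasets):
--   grouped_datasets = {}
--   for dataset in datasets:
--     key = dataset.split("seed")[0]
--     if (not key in grouped_datasets):
--       grouped_datasets[key] = []
--     grouped_datasets[key].append(dataset)
--   return grouped_datasets
-- ===== SOURCE B (Python) =====
-- def merge_datasets_per_seed(datasets):
--   keys = list(dict.fromkeys(d.split("seed")[0] for d in datasets))
--   return {k: [d for d in datasets if d.split("seed")[0] == k] for k in keys}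
-- ===== Notes on version B (the rewrite author's own statement) =====
-- stated objective: alternative
-- what changed: Replaces the single accumulating dict-building pass with a two-phase shape: first collect the distinct 'seed'-prefix keys in first-appearance order, then build the result by filtering the dataset list once per key.
import Mathlib
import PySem

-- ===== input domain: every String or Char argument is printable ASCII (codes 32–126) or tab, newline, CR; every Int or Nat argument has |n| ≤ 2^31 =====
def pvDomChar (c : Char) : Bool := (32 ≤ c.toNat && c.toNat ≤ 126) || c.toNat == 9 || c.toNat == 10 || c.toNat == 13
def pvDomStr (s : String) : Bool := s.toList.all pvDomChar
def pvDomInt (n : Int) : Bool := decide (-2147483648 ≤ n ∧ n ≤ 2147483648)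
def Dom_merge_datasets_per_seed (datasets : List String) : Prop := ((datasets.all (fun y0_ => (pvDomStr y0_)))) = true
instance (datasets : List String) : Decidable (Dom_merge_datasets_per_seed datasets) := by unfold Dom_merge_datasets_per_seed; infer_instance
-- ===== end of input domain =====

-- B groups by building the distinct key list first, then filtering the input once per key
-- (alternative decomposition; same return value as A's single accumulating pass).

-- dataset.split("seed")[0]: split with a nonempty separator always returns a nonempty
-- list, so the [0] indexing never raises and equals the head.
def pvKey (dataset : String) : String := ((PySem.Str.split? dataset "seed").getD []).headD ""

-- ===== PORT A =====
-- one iteration of A's loop body: ensure the key is present, then append in place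
def pvStepA (d : PySem.Dict String (List String)) (dataset : String) :
    PySem.Dict String (List String) :=
  let key := pvKey dataset
  let d1 := if d.contains key then d else d.insert key []
  d1.insert key (d1.getD key [] ++ [dataset])

def merge_datasets_per_seed (datasets : List String) : List (String × List String) :=
  (datasets.foldl pvStepA PySem.Dict.empty).items

-- ===== PORT B =====
def merge_datasets_per_seed_alt (datasets : List String) : List (String × List String) :=
  let keys := PySem.Set.ofList (datasets.map pvKey)
  keys.map (fun k => (k, datasets.filter (fun d => pvKey d == k)))

-- ===== PRECONDITION & SPEC =====
def Spec_merge_datasets_per_seed (datasets : List String) (out : List (String × List String)) : Prop := out = merge_datasets_per_seed_alt datasets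
instance (datasets : List String) (out : List (String × List String)) : Decidable (Spec_merge_datasets_per_seed datasets out) := by unfold Spec_merge_datasets_per_seed; infer_instance

-- ===== CLAIM (what is proved, stated in full; the proofs are below) =====
def Claim_equal_merge_datasets_per_seed : Prop := ∀ (datasets : List String), Dom_merge_datasets_per_seed datasets → Spec_merge_datasets_per_seed datasets (merge_datasets_per_seed datasets)

-- ===== LEMMAS AND PROOFS =====

theorem pvStepA_keys (d : PySem.Dict String (List String)) (x : String) :
    (pvStepA d x).keys = PySem.Set.add d.keys (pvKey x) := by
  unfold pvStepA
  by_cases h : d.contains (pvKey x) = true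
  · simp only [h, if_true]
    rw [PySem.Dict.keys_insert_of_contains d _ h,
        PySem.Set.add_of_mem ((PySem.Dict.contains_iff_mem_keys d (pvKey x)).mp h)]
  · have h' : d.contains (pvKey x) = false := by simpa using h
    simp only [h', Bool.false_eq_true, if_false]
    rw [PySem.Dict.keys_insert_of_contains _ _ (PySem.Dict.contains_insert_self d (pvKey x) []),
        PySem.Dict.keys_insert_of_not_contains d _ h',
        PySem.Set.add_of_not_mem]
    intro hm
    exact absurd ((PySem.Dict.contains_iff_mem_keys d (pvKey x)).mpr hm) (by simp [h'])

theorem foldl_stepA_keys (l : List String) (d : PySem.Dict String (List String)) :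
    (l.foldl pvStepA d).keys = PySem.Set.update d.keys (l.map pvKey) := by
  induction l generalizing d with
  | nil => simp [PySem.Set.update]
  | cons x l ih =>
      simp only [List.foldl_cons, List.map_cons]
      rw [ih, PySem.Set.update_cons, pvStepA_keys]

theorem pvStepA_getD (d : PySem.Dict String (List String)) (x c : String) :
    (pvStepA d x).getD c [] =
      if pvKey x = c then d.getD c [] ++ [x] else d.getD c [] := by
  unfold pvStepA
  by_cases h : d.contains (pvKey x) = true
  · simp only [h, if_true]
    rw [PySem.Dict.getD_insert]
    by_cases hc : c = pvKey x
    · subst hc; simp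
    · rw [if_neg hc, if_neg (fun h => hc h.symm)]
  · have h' : d.contains (pvKey x) = false := by simpa using h
    simp only [h', Bool.false_eq_true, if_false]
    rw [PySem.Dict.getD_insert]
    by_cases hc : c = pvKey x
    · subst hc
      rw [PySem.Dict.getD_insert_self, PySem.Dict.getD_of_not_contains d _ h']
    · rw [if_neg hc, PySem.Dict.getD_insert_of_ne _ _ _ hc, if_neg (fun h => hc h.symm)]

theorem foldl_stepA_getD (l : List String) (d : PySem.Dict String (List String)) (c : String) :
    (l.foldl pvStepA d).getD c [] = d.getD c [] ++ l.filter (fun x => pvKey x == c) := by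
  induction l generalizing d with
  | nil => simp
  | cons x l ih =>
      simp only [List.foldl_cons, List.filter_cons]
      rw [ih, pvStepA_getD]
      by_cases hc : pvKey x = c
      · simp [hc]
      · simp [hc]

-- ===== VERDICT (by name: the statement is the Claim_ definition above) =====
theorem merge_datasets_per_seed_spec : Claim_equal_merge_datasets_per_seed := by
  intro datasets _
  unfold Spec_merge_datasets_per_seed merge_datasets_per_seed merge_datasets_per_seed_alt
  have hkeys : (datasets.foldl pvStepA PySem.Dict.empty).keys
      = PySem.Set.ofList (datasets.map pvKey) := by
    rw [foldl_stepA_keys]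
    simp [PySem.Dict.keys_empty, PySem.Set.update_nil_left]
  have hnd : (datasets.foldl pvStepA PySem.Dict.empty).keys.Nodup := by
    rw [hkeys]; exact PySem.Set.nodup_ofList _
  rw [PySem.Dict.items_eq_map_keys _ hnd [], hkeys]
  refine List.map_congr_left ?_
  intro k _
  rw [foldl_stepA_getD]
  simp
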